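-- pv_equiv track=rewrite | github.com/musman2012/amd-segmentation-opencv-flask | app/testcv.py | find_ending_row_fluid
-- ===== SOURCE A (Python) =====
-- def find_ending_row_fluid(rpe_dict, counter):
-- 	if counter in rpe_dict:
-- 		starting_row = rpe_dict[counter]
-- 		return starting_row
-- 	else:
-- 		for i in range(150):
-- 			if counter - i in rpe_dict:
-- 				starting_row = rpe_dict[counter - i]
-- 				return starting_row
--
-- 			elif counter + i in rpe_dict:
-- 				starting_row = rpe_dict[counter + i]
-- 				return starting_row
--
-- 	return -99
-- ===== SOURCE B (Python) =====
-- def find_ending_row_fluid(rpe_dict, counter):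
--     best = None
--     for k in rpe_dict:
--         d = abs(k - counter)
--         if d <= 149 and (best is None or (d, k) < (abs(best - counter), best)):
--             best = k
--     return -99 if best is None else rpe_dict[best]
-- ===== Notes on version B (the rewrite author's own statement) =====
-- stated objective: simpler
-- what changed: Replaces A's loop probing up to 300 offset positions (counter-i, counter+i for i in 0..149) with a single pass over the dict's keys that keeps the nearest key within distance 149, breaking distance ties toward the lower key.
import Mathlib
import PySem

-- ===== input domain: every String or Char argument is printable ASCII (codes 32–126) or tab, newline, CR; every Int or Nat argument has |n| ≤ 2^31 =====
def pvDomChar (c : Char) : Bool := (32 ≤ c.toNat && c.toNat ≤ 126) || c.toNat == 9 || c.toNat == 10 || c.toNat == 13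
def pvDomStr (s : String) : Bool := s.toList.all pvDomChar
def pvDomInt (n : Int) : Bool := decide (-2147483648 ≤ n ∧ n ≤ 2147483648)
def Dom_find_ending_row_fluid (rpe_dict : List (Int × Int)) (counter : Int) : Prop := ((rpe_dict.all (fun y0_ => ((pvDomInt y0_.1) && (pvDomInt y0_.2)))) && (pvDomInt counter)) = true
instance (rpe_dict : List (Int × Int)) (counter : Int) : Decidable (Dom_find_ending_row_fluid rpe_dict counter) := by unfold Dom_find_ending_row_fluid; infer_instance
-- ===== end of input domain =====

-- B replaces A's 150-step offset probing with a single pass over the dict's keys keeping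
-- the nearest key (tie broken toward the lower key); objective: simpler (one scan of the
-- data instead of up to 300 membership probes).

-- ===== PORT A =====
-- the 'for i in range(150)' loop with its two probes and early returns
def pvProbeA (d : PySem.Dict Int Int) (c : Int) : List Int → Int
  | [] => -99
  | i :: rest =>
    if d.contains (c - i) then d.getD (c - i) 0
    else if d.contains (c + i) then d.getD (c + i) 0
    else pvProbeA d c rest

def find_ending_row_fluid (rpe_dict : List (Int × Int)) (counter : Int) : Int :=
  let d := PySem.Dict.ofList rpe_dict
  if d.contains counter then d.getD counter 0
  else pvProbeA d counter (PySem.List.pyRange 0 150 1)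

-- ===== PORT B =====
-- '(d, k) < (abs(best - counter), best)' — Python's lexicographic tuple comparison
def pvBetter (c k : Int) : Option Int → Bool
  | none => true
  | some b => decide ((k - c).natAbs < (b - c).natAbs ∨
                      ((k - c).natAbs = (b - c).natAbs ∧ k < b))

def find_ending_row_fluid_alt (rpe_dict : List (Int × Int)) (counter : Int) : Int :=
  let d := PySem.Dict.ofList rpe_dict
  let best := d.keys.foldl
    (fun best k => if (k - counter).natAbs ≤ 149 ∧ pvBetter counter k best = true then some k else best)
    none
  match best with
  | none => -99
  | some b => d.getD b 0

-- ===== PRECONDITION & SPEC =====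
def Spec_find_ending_row_fluid (rpe_dict : List (Int × Int)) (counter : Int) (out : Int) : Prop := out = find_ending_row_fluid_alt rpe_dict counter
instance (rpe_dict : List (Int × Int)) (counter : Int) (out : Int) : Decidable (Spec_find_ending_row_fluid rpe_dict counter out) := by unfold Spec_find_ending_row_fluid; infer_instance

-- ===== CLAIM (what is proved, stated in full; the proofs are below) =====
def Claim_equal_find_ending_row_fluid : Prop := ∀ (rpe_dict : List (Int × Int)) (counter : Int), Dom_find_ending_row_fluid rpe_dict counter → Spec_find_ending_row_fluid rpe_dict counter (find_ending_row_fluid rpe_dict counter)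

-- ===== LEMMAS AND PROOFS =====

-- strict lexicographic order on ((k-c).natAbs, k): the measure B minimises
def pvMlt (c b j : Int) : Prop :=
  (b - c).natAbs < (j - c).natAbs ∨ ((b - c).natAbs = (j - c).natAbs ∧ b < j)

theorem pvBetter_iff (c k : Int) (acc : Option Int) :
    pvBetter c k acc = true ↔ (acc = none ∨ ∃ b, acc = some b ∧ pvMlt c k b) := by
  cases acc with
  | none => simp [pvBetter]
  | some b => simp [pvBetter, pvMlt]

theorem pvMlt_asymm (c b j : Int) (h : pvMlt c b j) : ¬ pvMlt c j b := by
  rcases h with h | ⟨h1, h2⟩ <;> rintro (h' | ⟨h1', h2'⟩) <;> omega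

def pvFold (c : Int) (acc : Option Int) (L : List Int) : Option Int :=
  L.foldl (fun best k => if (k - c).natAbs ≤ 149 ∧ pvBetter c k best = true then some k else best) acc

theorem pvFold_none (c : Int) (L : List Int)
    (h : ∀ j ∈ L, ¬ (j - c).natAbs ≤ 149) : pvFold c none L = none := by
  induction L with
  | nil => rfl
  | cons k rest ih =>
    have hk := h k (by simp)
    simp only [pvFold, List.foldl_cons]
    rw [if_neg (by exact fun hc => hk hc.1)]
    exact ih (fun j hj => h j (by simp [hj]))

theorem pvFold_min (c b : Int) (L : List Int) (acc : Option Int)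
    (hb : b ∈ L ∨ acc = some b)
    (hd : (b - c).natAbs ≤ 149)
    (hmin : ∀ j ∈ L, (j - c).natAbs ≤ 149 → j ≠ b → pvMlt c b j)
    (hacc : ∀ a, acc = some a → a ≠ b → pvMlt c b a) :
    pvFold c acc L = some b := by
  induction L generalizing acc with
  | nil =>
    rcases hb with h | h
    · exact absurd h (List.not_mem_nil)
    · simpa [pvFold] using h
  | cons k rest ih =>
    simp only [pvFold, List.foldl_cons]
    by_cases hk : (k - c).natAbs ≤ 149 ∧ pvBetter c k acc = true
    · rw [if_pos hk]
      by_cases hkb : k = b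
      · subst hkb
        exact ih (acc := some k) (Or.inr rfl)
          (fun j hj hjd hjb => hmin j (by simp [hj]) hjd hjb)
          (fun a ha hab => by simp at ha; exact absurd ha.symm hab)
      · -- k is a candidate different from b, so pvMlt c b k; but pvBetter said k beats acc
        have hbk : pvMlt c b k := hmin k (by simp) hk.1 hkb
        have hbrest : b ∈ rest := by
          rcases hb with h | h
          · rcases List.mem_cons.mp h with h' | h'
            · exact absurd h'.symm hkb
            · exact h'
          · -- acc = some b, and pvBetter c k acc = true gives pvMlt c k b, contradiction
            rcases (pvBetter_iff c k acc).mp hk.2 with h' | ⟨a, ha, hkm⟩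
            · rw [h] at h'; exact absurd h' (by simp)
            · rw [h] at ha; simp at ha; subst ha
              exact absurd hkm (pvMlt_asymm c b k hbk)
        exact ih (acc := some k) (Or.inl hbrest)
          (fun j hj hjd hjb => hmin j (by simp [hj]) hjd hjb)
          (fun a ha hab => by simp at ha; subst ha; exact hbk)
    · rw [if_neg hk]
      have hnext : b ∈ rest ∨ acc = some b := by
        by_cases hkb : k = b
        · subst hkb
          right
          cases hacc' : acc with
          | none => exact absurd ⟨hd, by simp [pvBetter, hacc']⟩ hk
          | some a =>
            by_cases hab : a = k
            · simp [hab]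
            · exfalso
              exact hk ⟨hd, (pvBetter_iff c k acc).mpr
                (Or.inr ⟨a, hacc', hacc a hacc' hab⟩)⟩
        · rcases hb with h | h
          · rcases List.mem_cons.mp h with h' | h'
            · exact absurd h'.symm hkb
            · exact Or.inl h'
          · exact Or.inr h
      exact ih (acc := acc) hnext
        (fun j hj hjd hjb => hmin j (by simp [hj]) hjd hjb) hacc

-- the value B computes, as a function of the key set
def pvBval (d : PySem.Dict Int Int) (c : Int) : Int :=
  match pvFold c none d.keys with
  | none => -99
  | some b => d.getD b 0

theorem probe_eq (d : PySem.Dict Int Int) (c : Int) (n : Nat) (hn : n ≤ 150)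
    (h : ∀ j ∈ d.keys, (150 - n : Int) ≤ ((j - c).natAbs : Int)) :
    pvProbeA d c (PySem.List.pyRange (150 - (n : Int)) 150 1) = pvBval d c := by
  induction n with
  | zero =>
    rw [PySem.List.pyRange_one_eq_nil (by omega)]
    have : pvFold c none d.keys = none := by
      apply pvFold_none
      intro j hj hle
      have := h j hj
      omega
    simp [pvProbeA, pvBval, this]
  | succ m ih =>
    have hi : (150 - ((m : Int) + 1)) < 150 := by omega
    rw [show ((m + 1 : Nat) : Int) = (m : Int) + 1 by push_cast; ring]
    rw [PySem.List.pyRange_one_cons hi]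
    set i : Int := 150 - ((m : Int) + 1) with hidef
    have hi0 : 0 ≤ i := by omega
    have hi149 : i ≤ 149 := by omega
    simp only [pvProbeA]
    by_cases hlo : d.contains (c - i) = true
    · rw [if_pos hlo]
      have hmem : c - i ∈ d.keys := (PySem.Dict.contains_iff_mem_keys _ _).mp hlo
      have hres : pvFold c none d.keys = some (c - i) := by
        apply pvFold_min c (c - i) d.keys none (Or.inl hmem)
        · omega
        · intro j hj hjd hjne
          have hge := h j hj
          by_cases heq : ((j - c).natAbs : Int) = i
          · have : j = c - i ∨ j = c + i := by omega
            rcases this with h' | h'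
            · exact absurd h' hjne
            · right
              constructor
              · omega
              · -- c - i < c + i since i > 0 (i = 0 would give j = c - i)
                have : i ≠ 0 := by
                  intro h0
                  apply hjne; omega
                omega
          · left; omega
        · intro a ha; simp at ha
      simp [pvBval, hres]
    · rw [if_neg hlo]
      have hloK : c - i ∉ d.keys := fun hm => hlo ((PySem.Dict.contains_iff_mem_keys _ _).mpr hm)
      by_cases hhi : d.contains (c + i) = true
      · rw [if_pos hhi]
        have hmem : c + i ∈ d.keys := (PySem.Dict.contains_iff_mem_keys _ _).mp hhi
        have hres : pvFold c none d.keys = some (c + i) := by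
          apply pvFold_min c (c + i) d.keys none (Or.inl hmem)
          · omega
          · intro j hj hjd hjne
            have hge := h j hj
            by_cases heq : ((j - c).natAbs : Int) = i
            · have : j = c - i ∨ j = c + i := by omega
              rcases this with h' | h'
              · subst h'; exact absurd hj hloK
              · exact absurd h' hjne
            · left; omega
          · intro a ha; simp at ha
        simp [pvBval, hres]
      · rw [if_neg hhi]
        have hhiK : c + i ∉ d.keys := fun hm => hhi ((PySem.Dict.contains_iff_mem_keys _ _).mpr hm)
        have harg : 150 - (m : Int) = i + 1 := by omega
        rw [show i + 1 = 150 - (m : Int) by omega] at *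
        apply ih (by omega)
        intro j hj
        have hge := h j hj
        by_cases heq : ((j - c).natAbs : Int) = i
        · exfalso
          have : j = c - i ∨ j = c + i := by omega
          rcases this with h' | h' <;> subst h'
          · exact hloK hj
          · exact hhiK hj
        · omega

-- ===== VERDICT (by name: the statement is the Claim_ definition above) =====
theorem find_ending_row_fluid_spec : Claim_equal_find_ending_row_fluid := by
  intro rpe_dict counter _
  unfold Spec_find_ending_row_fluid find_ending_row_fluid find_ending_row_fluid_alt
  set d := PySem.Dict.ofList rpe_dict with hd
  set c := counter
  have halt : (match pvFold c none d.keys with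
      | none => -99
      | some b => d.getD b 0) = pvBval d c := rfl
  by_cases hc : d.contains c = true
  · rw [if_pos hc]
    have hmem : c ∈ d.keys := (PySem.Dict.contains_iff_mem_keys _ _).mp hc
    have hres : pvFold c none d.keys = some c := by
      apply pvFold_min c c d.keys none (Or.inl hmem)
      · simp
      · intro j hj hjd hjne
        left
        omega
      · intro a ha; simp at ha
    simp only [pvFold] at hres
    simp [hres]
  · rw [if_neg hc]
    have h := probe_eq d c 150 (le_refl _) (by intro j hj; simp)
    simp only [show (150 : Int) - ((150 : Nat) : Int) = 0 by norm_num] at h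
    rw [h]
    rfl
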